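-- pv_equiv track=rewrite | github.com/NeevesLab/Volumetric-Image-Processing | vsi_metadata.py | change_file_num
-- ===== SOURCE A (Python) =====
-- def change_file_num(string,meta_number):
--     nums=[]
--     location=[]
--     split_string=split(string)
--     for i in range(len(split_string)):
--         if split_string[i].isdigit():
--             nums.append(split_string[i])
--             location.append(i)
--     nums=[int(i) for i in split(string) if i.isdigit()]
--     original=nums[-1]
--     update=meta_number
--     loc=location[-1]
--     split_string[loc]=str(update)
--     new_string = "".join(split_string)
--     return new_string
--
-- def split(word):
--     return [char for char in word]
-- ===== SOURCE B (Python) =====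
-- def change_file_num(string, meta_number):
--     for i in range(len(string) - 1, -1, -1):
--         if string[i].isdigit():
--             return string[:i] + str(meta_number) + string[i + 1:]
--     raise IndexError("no digit in string")
-- ===== Notes on version B (the rewrite author's own statement) =====
-- stated objective: simpler
-- what changed: B replaces A's forward pass that builds a char list plus digit-position lists and re-joins with a single backward scan that returns at the first (i.e. last) digit via string slicing.
import Mathlib
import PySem

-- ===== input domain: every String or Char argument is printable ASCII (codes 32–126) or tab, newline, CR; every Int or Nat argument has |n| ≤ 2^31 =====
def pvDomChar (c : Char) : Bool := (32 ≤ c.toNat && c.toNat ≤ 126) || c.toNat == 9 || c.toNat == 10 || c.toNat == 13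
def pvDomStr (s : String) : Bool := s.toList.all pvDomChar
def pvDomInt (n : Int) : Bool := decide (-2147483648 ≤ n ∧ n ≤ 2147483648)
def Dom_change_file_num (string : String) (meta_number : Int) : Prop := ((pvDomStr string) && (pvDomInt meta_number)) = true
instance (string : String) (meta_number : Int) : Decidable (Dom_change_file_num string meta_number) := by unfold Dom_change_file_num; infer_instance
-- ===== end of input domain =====

-- B: one backward scan returning at the last digit via slicing, instead of A's forward pass
-- building char-list and digit-position lists and re-joining (objective: simpler; return values only, neither mutates).

-- ===== PORT A =====
-- split(word) = [char for char in word]  (list of single-character strings, here List (List Char))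
def pvSplit (word : List Char) : List (List Char) := word.map (fun c => [c])

def change_file_num (string : String) (meta_number : Int) : String :=
  let split_string : List (List Char) := pvSplit string.toList
  -- for i in range(len(split_string)): if split_string[i].isdigit(): nums.append(…); location.append(i)
  let nl : List (List Char) × List Int :=
    (PySem.List.pyRange 0 (split_string.length : Int) 1).foldl
      (fun acc i =>
        let s := PySem.List.pyGetD split_string i []
        if PySem.Chars.strIsdigit s then (acc.1 ++ [s], acc.2 ++ [i]) else acc)
      ([], [])
  let location := nl.2
  -- nums = [int(i) for i in split(string) if i.isdigit()]  (int() on a single digit char never fails; getD 0 unreachable)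
  let nums : List Int :=
    ((pvSplit string.toList).filter PySem.Chars.strIsdigit).map
      (fun s => (PySem.Int.ofChars? s).getD 0)
  -- original = nums[-1]; loc = location[-1]  (IndexError when the lists are empty → none; excluded by Pre_)
  match PySem.List.pyGet? nums (-1), PySem.List.pyGet? location (-1) with
  | some _, some loc =>
      -- split_string[loc] = str(update): loc comes from range(len), so 0 ≤ loc < len; List.set is exact here
      let split_string := split_string.set loc.toNat (PySem.Int.toChars meta_number)
      -- "".join(split_string): joining with the empty separator = flatten (exact)
      String.ofList split_string.flatten
  | _, _ => ""  -- Python raises IndexError here (no digit in string); outside Pre_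

-- ===== PORT B =====
def change_file_num_alt (string : String) (meta_number : Int) : String :=
  let cs := string.toList
  -- for i in range(len(string)-1, -1, -1): if string[i].isdigit(): return …  (early exit = find?)
  match (PySem.List.pyRange ((cs.length : Int) - 1) (-1) (-1)).find?
      (fun i => PySem.Chars.strIsdigit [((PySem.List.pyGet? cs i).getD ' ')]) with
  | some i =>
      String.ofList (PySem.List.slice cs none (some i) ++ PySem.Int.toChars meta_number
                 ++ PySem.List.slice cs (some (i + 1)) none)
  | none => ""  -- Python raises IndexError here; outside Pre_

-- ===== PRECONDITION & SPEC =====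
-- Pre_ excludes exactly the strings containing no digit character, on which the Python A raises
-- IndexError at nums[-1] (B raises IndexError there too).
def Pre_change_file_num (string : String) (meta_number : Int) : Prop :=
  string.toList.any (fun c => PySem.Chars.isdigit c) = true
instance (string : String) (meta_number : Int) : Decidable (Pre_change_file_num string meta_number) := by unfold Pre_change_file_num; infer_instance

def pvWitness_change_file_num : String × Int := ("file_3.vsi", 12)

def Spec_change_file_num (string : String) (meta_number : Int) (out : String) : Prop := out = change_file_num_alt string meta_number
instance (string : String) (meta_number : Int) (out : String) : Decidable (Spec_change_file_num string meta_number out) := by unfold Spec_change_file_num; infer_instance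

-- ===== CLAIM (what is proved, stated in full; the proofs are below) =====
def Claim_equal_change_file_num : Prop := ∀ (string : String) (meta_number : Int), Dom_change_file_num string meta_number → Pre_change_file_num string meta_number → Spec_change_file_num string meta_number (change_file_num string meta_number)

-- ===== LEMMAS AND PROOFS =====

-- single-character string s.isdigit(), as both loops apply it
def pvP (c : Char) : Bool := PySem.Chars.strIsdigit [c]

lemma pvP_eq (c : Char) : pvP c = PySem.Chars.isdigit c := by
  simp [pvP, PySem.Chars.strIsdigit]

-- the list of digit positions of cs, offset by k (A's `location` for k = 0)
def pvLocs : List Char → Int → List Int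
  | [], _ => []
  | c :: t, k => (if pvP c then [k] else []) ++ pvLocs t (k + 1)

lemma pvLocs_append (t : List Char) (c : Char) (k : Int) :
    pvLocs (t ++ [c]) k = pvLocs t k ++ (if pvP c then [k + (t.length : Int)] else []) := by
  induction t generalizing k with
  | nil => simp [pvLocs]
  | cons a t ih =>
    have : k + 1 + (t.length : Int) = k + ((t.length : Int) + 1) := by ring
    simp [pvLocs, ih, List.append_assoc, this]

lemma pvLocs_bound {x : Int} {t : List Char} {k : Int} (h : x ∈ pvLocs t k) :
    k ≤ x ∧ x < k + (t.length : Int) := by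
  induction t generalizing k with
  | nil => simp [pvLocs] at h
  | cons a t ih =>
    simp only [pvLocs, List.mem_append] at h
    have hl : (((a :: t).length : Nat) : Int) = (t.length : Int) + 1 := by
      push_cast [List.length_cons]; ring
    rcases h with h | h
    · split at h <;> simp at h
      rw [hl]; omega
    · have := ih h
      rw [hl]; omega

lemma pvLocs_nil_iff (t : List Char) (k : Int) :
    pvLocs t k = [] ↔ t.filter pvP = [] := by
  induction t generalizing k with
  | nil => simp [pvLocs]
  | cons a t ih =>
    by_cases h : pvP a <;> simp [pvLocs, h, List.filter_cons, ih]

lemma pv_A_fold (cs : List Char) (k : Nat) (hk : k ≤ cs.length) :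
    (PySem.List.pyRange 0 (k : Int) 1).foldl
      (fun acc i =>
        if PySem.Chars.strIsdigit (PySem.List.pyGetD (pvSplit cs) i []) then
          (acc.1 ++ [PySem.List.pyGetD (pvSplit cs) i []], acc.2 ++ [i])
        else acc)
      ([], [])
    = (((cs.take k).filter pvP).map (fun c => [c]), pvLocs (cs.take k) 0) := by
  induction k with
  | zero => simp [PySem.List.pyRange_one_eq_nil (le_refl (0 : Int)), pvLocs]
  | succ k ih =>
    have hk' : k ≤ cs.length := Nat.le_of_succ_le hk
    have hlt : k < cs.length := hk
    have hcast : ((k + 1 : Nat) : Int) = (k : Int) + 1 := by push_cast; ring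
    rw [hcast, PySem.List.pyRange_one_succ_right (by positivity), List.foldl_append, ih hk']
    have hget : PySem.List.pyGetD (pvSplit cs) ((k : Nat) : Int) [] = [cs[k]] := by
      simp [PySem.List.pyGetD_natCast, pvSplit, List.getD_eq_getElem?_getD,
        List.getElem?_eq_getElem (by simpa using hlt : k < (cs.map fun c => [c]).length)]
    have htake : cs.take (k + 1) = cs.take k ++ [cs[k]] := by
      rw [List.take_add_one]; simp [List.getElem?_eq_getElem hlt]
    simp only [List.foldl_cons, List.foldl_nil, hget, htake, List.filter_append,
      List.map_append, pvLocs_append]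
    by_cases h : PySem.Chars.strIsdigit [cs[k]]
    · have hp : pvP cs[k] = true := h
      simp [h, hp, List.length_take, Nat.min_eq_left hk']
    · have hp : pvP cs[k] = false := by simpa [pvP] using h
      simp [h, hp]

lemma pv_B_find (cs : List Char) (k : Nat) (hk : k ≤ cs.length) :
    (PySem.List.pyRange ((k : Int) - 1) (-1) (-1)).find?
      (fun i => PySem.Chars.strIsdigit [((PySem.List.pyGet? cs i).getD ' ')])
    = (pvLocs (cs.take k) 0).getLast? := by
  induction k with
  | zero => simp [PySem.List.pyRange_neg_one_eq_nil (by omega : (0 : Int) - 1 ≤ -1), pvLocs]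
  | succ k ih =>
    have hk' : k ≤ cs.length := Nat.le_of_succ_le hk
    have hlt : k < cs.length := hk
    have hcast : ((k + 1 : Nat) : Int) - 1 = (k : Int) := by push_cast; ring
    rw [hcast, PySem.List.pyRange_neg_one_cons (by omega : (-1 : Int) < (k : Int))]
    have htake : cs.take (k + 1) = cs.take k ++ [cs[k]] := by
      rw [List.take_add_one]; simp [List.getElem?_eq_getElem hlt]
    rw [htake, pvLocs_append]
    by_cases h : PySem.Chars.strIsdigit [cs[k]]
    · have hp : pvP cs[k] = true := h
      simp [List.find?_cons, List.getElem?_eq_getElem hlt, h, hp,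
        List.length_take, Nat.min_eq_left hk']
    · have hp : pvP cs[k] = false := by simpa [pvP] using h
      simp [List.find?_cons, List.getElem?_eq_getElem hlt, h, hp, ih hk']

lemma pv_flatten_singletons (l : List Char) : (l.map (fun c => [c])).flatten = l := by
  induction l with
  | nil => rfl
  | cons a t ih => simp [ih]

lemma pv_out_eq (cs : List Char) (L : List Char) (n : Nat) (hn : n < cs.length) :
    ((pvSplit cs).set n L).flatten = cs.take n ++ L ++ cs.drop (n + 1) := by
  have hn' : n < (pvSplit cs).length := by simpa [pvSplit] using hn
  rw [List.set_eq_take_cons_drop _ hn']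
  simp [pvSplit, ← List.map_take, ← List.map_drop, pv_flatten_singletons]

-- ===== VERDICT (by name: the statement is the Claim_ definition above) =====
theorem change_file_num_spec : Claim_equal_change_file_num := by
  intro s m _ hpre
  unfold Spec_change_file_num change_file_num change_file_num_alt
  dsimp only
  set cs := s.toList with hcs
  have hfil : cs.filter pvP ≠ [] := by
    simp only [Pre_change_file_num, List.any_eq_true] at hpre
    obtain ⟨c, hc, hd⟩ := hpre
    intro hnil
    have : c ∈ cs.filter pvP := List.mem_filter.2 ⟨hc, by rw [pvP_eq]; exact hd⟩
    simp [hnil] at this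
  have hlocs : pvLocs cs 0 ≠ [] := by
    rw [Ne, pvLocs_nil_iff]; exact hfil
  obtain ⟨j, hj⟩ : ∃ j, (pvLocs cs 0).getLast? = some j := by
    cases h : (pvLocs cs 0).getLast? with
    | none => exact absurd (List.getLast?_eq_none_iff.1 h) hlocs
    | some j => exact ⟨j, rfl⟩
  have hjb := pvLocs_bound (List.mem_of_getLast? hj)
  have hj0 : 0 ≤ j := hjb.1
  have hjn : ((j.toNat : Nat) : Int) = j := Int.toNat_of_nonneg hj0
  have hn : j.toNat < cs.length := by omega
  have hA := pv_A_fold cs cs.length le_rfl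
  rw [List.take_length] at hA
  have hB := pv_B_find cs cs.length le_rfl
  rw [List.take_length, hj] at hB
  have hnums : ((pvSplit cs).filter PySem.Chars.strIsdigit).map
      (fun s => (PySem.Int.ofChars? s).getD 0)
      = ((cs.filter pvP).map (fun c => [c])).map (fun s => (PySem.Int.ofChars? s).getD 0) := by
    rw [pvSplit, List.filter_map]; rfl
  obtain ⟨v, hv⟩ : ∃ v, (((cs.filter pvP).map (fun c => [c])).map
      (fun s => (PySem.Int.ofChars? s).getD 0)).getLast? = some v := by
    cases h : (((cs.filter pvP).map (fun c => [c])).map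
        (fun s => (PySem.Int.ofChars? s).getD 0)).getLast? with
    | none => exact absurd (by simpa using List.getLast?_eq_none_iff.1 h) hfil
    | some v => exact ⟨v, rfl⟩
  have hlen' : (((pvSplit cs).length : Nat) : Int) = ((cs.length : Nat) : Int) := by
    simp [pvSplit]
  rw [hlen', hA, hnums, PySem.List.pyGet?_neg_one, PySem.List.pyGet?_neg_one, hv, hj, hB]
  have hsl1 : PySem.List.slice cs none (some j) = cs.take j.toNat := by
    rw [← hjn, PySem.List.slice_to]
    exact Int.natCast_nonneg _
  have hsl2 : PySem.List.slice cs (some (j + 1)) none = cs.drop (j.toNat + 1) := by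
    rw [show j + 1 = ((j.toNat + 1 : Nat) : Int) by omega, PySem.List.slice_from]
    · simp; omega
    · exact Int.natCast_nonneg _
  simp [pv_out_eq cs (PySem.Int.toChars m) j.toNat hn, hsl1, hsl2]
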